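-- pv_equiv track=rewrite | github.com/nsimeyroneinc/NSITerm2024 | python/DS0011/Ex1.py | max_pile_v
-- ===== SOURCE A (Python) =====
-- def creer_pile_vide():
--     return []
--
-- def est_vide(P):
--     if P==[]:
--         return True
--     else:
--         return False
--
-- def empiler(P,x):
--     P.append(x)
--
-- def depiler(P):
--     if est_vide(P) == True :
--         raise IndexError("Vous avez essayé de dépiler une pile vide !")
--     else :
--         return P.pop()
--
-- def max_pile_v(P,i):
--     Q=creer_pile_vide()
--     sommetpile=1
--     x=depiler(P)
--     max=x
--     empiler(Q,x)
--     n=1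
--     while sommetpile<i and not (est_vide(P)): #On a inégalité stricte car on par de l ' indice 2 pour la boucle
--         sommetpile+=1
--         x=depiler(P)
--         empiler(Q,x)
--         if x>max:
--             n=sommetpile
--             max=x
--     while not est_vide(Q):
--         x=depiler(Q)
--         empiler(P,x)
--     return n
-- ===== SOURCE B (Python) =====
-- def max_pile_v(P, i):
--     # Read the top elements by reverse indexing; never mutates P.
--     if not P:
--         raise IndexError("Vous avez essayé de dépiler une pile vide !")
--     k = max(1, min(i, len(P)))
--     best = P[-1]
--     n = 1
--     for j in range(1, k):
--         x = P[-1 - j]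
--         if x > best:
--             best = x
--             n = j + 1
--     return n
-- ===== Notes on version B (the rewrite author's own statement) =====
-- stated objective: simpler
-- what changed: B reads the top min(i,len) elements of P directly by negative indexing instead of popping them into an auxiliary stack and pushing them all back; the auxiliary stack and the restoration loop disappear and P is never mutated.
import Mathlib
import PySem

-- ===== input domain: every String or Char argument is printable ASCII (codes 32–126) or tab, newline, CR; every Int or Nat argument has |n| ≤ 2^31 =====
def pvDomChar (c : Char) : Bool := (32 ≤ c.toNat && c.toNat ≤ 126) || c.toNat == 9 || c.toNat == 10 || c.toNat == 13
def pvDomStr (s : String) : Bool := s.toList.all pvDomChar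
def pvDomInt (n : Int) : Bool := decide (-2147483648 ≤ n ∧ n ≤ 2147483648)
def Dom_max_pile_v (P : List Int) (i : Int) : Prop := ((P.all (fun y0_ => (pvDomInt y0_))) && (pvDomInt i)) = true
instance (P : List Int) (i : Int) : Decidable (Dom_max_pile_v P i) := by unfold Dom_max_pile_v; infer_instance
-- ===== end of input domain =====

-- B reads the top elements of P by negative indexing instead of popping into an
-- auxiliary stack and restoring (simpler; A mutates P but restores it, so the
-- return value is the whole observable behaviour on Pre_).

-- ===== PORT A =====
-- Stacks are Python lists with the top at the END; we carry the remaining pile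
-- reversed (head = top), so 'depiler' is taking the head. The auxiliary stack Q
-- and the final restoration loop do not affect the returned value n, and P is
-- restored exactly, so the port returns n directly.
def maxLoopA (S : List Int) (i sommetpile mx n : Int) : Int :=
  if sommetpile < i then
    match S with
    | [] => n
    | x :: rest =>
        if x > mx then maxLoopA rest i (sommetpile + 1) x (sommetpile + 1)
        else maxLoopA rest i (sommetpile + 1) mx n
  else n
termination_by S.length

def max_pile_v (P : List Int) (i : Int) : Int :=
  match P.reverse with
  | [] => 0          -- depiler raises IndexError here; excluded by Pre_
  | x :: rest => maxLoopA rest i 1 x 1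

-- ===== PORT B =====
def max_pile_v_alt (P : List Int) (i : Int) : Int :=
  if P = [] then 0   -- B raises IndexError here; excluded by Pre_
  else
    let k : Int := max 1 (min i (P.length : Int))
    let b := (PySem.List.pyGet? P (-1)).getD 0
    ((PySem.List.pyRange 1 k 1).foldl
      (fun (st : Int × Int) j =>
        match PySem.List.pyGet? P (-1 - j) with
        | none => st
        | some x => if x > st.1 then (x, j + 1) else st) (b, 1)).2

-- ===== PRECONDITION & SPEC =====
-- A raises IndexError («dépiler une pile vide») on an empty pile.
def Pre_max_pile_v (P : List Int) (i : Int) : Prop := P ≠ []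
instance (P : List Int) (i : Int) : Decidable (Pre_max_pile_v P i) := by unfold Pre_max_pile_v; infer_instance
def pvWitness_max_pile_v : List Int × Int := ([3, 1, 4, 1], 3)

def Spec_max_pile_v (P : List Int) (i : Int) (out : Int) : Prop := out = max_pile_v_alt P i
instance (P : List Int) (i : Int) (out : Int) : Decidable (Spec_max_pile_v P i out) := by unfold Spec_max_pile_v; infer_instance

-- ===== CLAIM (what is proved, stated in full; the proofs are below) =====
def Claim_equal_max_pile_v : Prop := ∀ (P : List Int) (i : Int), Dom_max_pile_v P i → Pre_max_pile_v P i → Spec_max_pile_v P i (max_pile_v P i)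

-- ===== LEMMAS AND PROOFS =====

-- The generic bridge: A's pop loop over the reversed remainder equals B's fold
-- over the index range, for any loop counter s ≥ 1 and any accumulated state.
theorem maxLoopA_eq_fold (P : List Int) (i : Int) :
    ∀ (S : List Int) (s mx n : Int), 1 ≤ s → S = P.reverse.drop s.toNat →
    maxLoopA S i s mx n =
      ((PySem.List.pyRange s (max 1 (min i (P.length : Int))) 1).foldl
        (fun (st : Int × Int) j =>
          match PySem.List.pyGet? P (-1 - j) with
          | none => st
          | some x => if x > st.1 then (x, j + 1) else st) (mx, n)).2 := by
  intro S
  induction S with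
  | nil =>
      intro s mx n hs hdrop
      have hlen0 : P.length ≤ s.toNat := by
        have h := congrArg List.length hdrop
        simp [List.length_drop, List.length_reverse] at h
        omega
      have hk : max 1 (min i (P.length : Int)) ≤ s := by omega
      rw [maxLoopA, PySem.List.pyRange_one_eq_nil hk]
      split_ifs <;> rfl
  | cons x rest ih =>
      intro s mx n hs hdrop
      have hlt' : s.toNat < P.length := by
        have h := congrArg List.length hdrop
        simp [List.length_drop, List.length_reverse] at h
        omega
      have hslen : s < (P.length : Int) := by omega
      by_cases hsi : s < i
      · -- one more iteration on both sides
        have hsk : s < max 1 (min i (P.length : Int)) := by omega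
        have hx : P.reverse[s.toNat]? = some x := by
          have h := List.getElem?_drop (xs := P.reverse) (i := s.toNat) (j := 0)
          rw [← hdrop] at h
          simpa using h.symm
        have hget : PySem.List.pyGet? P (-1 - s) = some x := by
          have h1 : (-1 - s) = -(((1 + s).toNat : Nat) : Int) := by omega
          rw [h1, PySem.List.pyGet?_neg_natCast P (1 + s).toNat (by omega) (by omega)]
          have h2 : P.length - (1 + s).toNat = P.length - 1 - s.toNat := by omega
          rw [List.getElem?_reverse hlt'] at hx
          rw [h2]
          exact hx
        have hrest : rest = P.reverse.drop (s + 1).toNat := by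
          have h2 : P.reverse.drop (s + 1).toNat = (P.reverse.drop s.toNat).drop 1 := by
            rw [List.drop_drop]
            congr 1
            omega
          rw [h2, ← hdrop]
          rfl
        rw [maxLoopA, if_pos hsi, PySem.List.pyRange_one_cons hsk]
        simp only [List.foldl_cons, hget]
        by_cases hcmp : x > mx
        · simp only [if_pos hcmp]
          exact ih (s + 1) x (s + 1) (by omega) hrest
        · simp only [if_neg hcmp]
          exact ih (s + 1) mx n (by omega) hrest
      · -- loop ends; the range is empty too
        have hk : max 1 (min i (P.length : Int)) ≤ s := by omega
        rw [maxLoopA, if_neg hsi, PySem.List.pyRange_one_eq_nil hk]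
        rfl

-- ===== VERDICT (by name: the statement is the Claim_ definition above) =====
theorem max_pile_v_spec : Claim_equal_max_pile_v := by
  intro P i _ hP
  unfold Spec_max_pile_v max_pile_v max_pile_v_alt
  have hPrev : P.reverse ≠ [] := by simpa using hP
  obtain ⟨x, rest, hx⟩ := List.exists_cons_of_ne_nil hPrev
  rw [hx, if_neg hP]
  have hb : (PySem.List.pyGet? P (-1)).getD 0 = x := by
    rw [PySem.List.pyGet?_neg_one, List.getLast?_eq_head?_reverse, hx]
    rfl
  simp only [hb]
  exact maxLoopA_eq_fold P i rest 1 x 1 le_rfl (by simp [hx])
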